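-- pv_equiv track=rewrite | github.com/Mohamed-24-03-2022/python_tp_oop | S01_TP01_template.py | get_molar_mass
-- ===== SOURCE A (Python) =====
-- def are_chars(chars, string):
--     """ Retourne 'True' si tous les caractères 'chars' appartiennent la chaine 'string'.
--     False sinon."""
--
--     #! Method 1 sans l'operateur "in"
--     # is_char_in_there = [False] * len(chars)
--
--     # for i in range(len(chars)):
--     #     if (chars[i] == ''):
--     #         return False
--     #     for j in range(len(string)):
--     #         if (chars[i] == string[j]):
--     #             is_char_in_there[i] = True
--
--     # for res in is_char_in_there:
--     #     if (res == False):
--     #         return res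
--     # return True
--
--     #! Method 2 avec l'operateur "in"
--     for char in chars:
--         if (char not in string):
--             return False
--     return True
--
-- def is_dna(dna):
--     """ Retourne 'True' si le brin 'dna' contient uniquement des bases A, T, G ou C (et au moins une).
--     'False' sinon. Il faudra utiliser la fonction 'are_chars'."""
--
--     if (len(dna) == 0):
--         return False
--
--     return are_chars(dna.upper(), "ATGC")
--
-- def get_molar_mass(dna):
--     """ Retourne 0 si dna n'est pas un brin. Sinon, retourne la masse molaire du brin 'dna'.
--     Il faudra utiliser la fonction 'is_dna'."""
--
--     if (not is_dna(dna)):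
--         return 0
--     masse = 0
--     for char in dna:
--         if (char == 'A'):
--             masse += 135
--         if (char == 'T'):
--             masse += 126
--         if (char == 'G'):
--             masse += 151
--         if (char == 'C'):
--             masse += 111
--     return masse
-- ===== SOURCE B (Python) =====
-- def get_molar_mass(dna):
--     """ Retourne 0 si dna n'est pas un brin. Sinon, retourne la masse molaire du brin 'dna'. """
--     if not dna or any(c not in "ATGC" for c in dna.upper()):
--         return 0
--     counts = {}
--     for ch in dna:
--         counts[ch] = counts.get(ch, 0) + 1
--     masses = [('A', 135), ('T', 126), ('G', 151), ('C', 111)]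
--     return sum(m * counts.get(b, 0) for b, m in masses)
-- ===== Notes on version B (the rewrite author's own statement) =====
-- stated objective: alternative
-- what changed: Replaces the helper-chain validation (are_chars/is_dna with early-return loop) plus a single branchy per-character if-chain accumulation by an inline any()-validation followed by a two-phase tabulation: build a character-frequency dict in one pass, then take the dot product with a fixed base→mass table.
import Mathlib
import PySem

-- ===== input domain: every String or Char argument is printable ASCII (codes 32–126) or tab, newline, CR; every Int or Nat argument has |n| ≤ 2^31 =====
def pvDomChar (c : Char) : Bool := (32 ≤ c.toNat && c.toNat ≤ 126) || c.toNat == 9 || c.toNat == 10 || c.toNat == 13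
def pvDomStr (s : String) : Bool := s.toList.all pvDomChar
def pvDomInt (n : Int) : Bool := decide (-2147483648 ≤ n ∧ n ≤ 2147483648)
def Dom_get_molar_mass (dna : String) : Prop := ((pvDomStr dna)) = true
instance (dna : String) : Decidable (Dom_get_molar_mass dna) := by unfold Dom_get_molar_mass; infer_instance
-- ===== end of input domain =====

-- B replaces the are_chars/is_dna helper chain and the branchy one-pass accumulation by an
-- inline any()-validation plus a frequency-dict tabulation dotted with a fixed mass table.

-- ===== PORT A =====
-- for char in chars: if char not in string: return False / return True
def are_chars_go (string : String) : List Char → Bool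
  | [] => true
  | c :: rest =>
      if ¬ (PySem.Chars.isIn [c] string.toList) then false
      else are_chars_go string rest

def are_chars (chars string : String) : Bool :=
  are_chars_go string chars.toList

def is_dna (dna : String) : Bool :=
  if PySem.Str.len dna = 0 then false
  else are_chars (PySem.Str.upper dna) "ATGC"

def get_molar_mass (dna : String) : Int :=
  if ¬ is_dna dna then 0
  else
    dna.toList.foldl (fun masse char =>
      let masse := if char == 'A' then masse + 135 else masse
      let masse := if char == 'T' then masse + 126 else masse
      let masse := if char == 'G' then masse + 151 else masse
      if char == 'C' then masse + 111 else masse) 0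

-- ===== PORT B =====
def get_molar_mass_alt (dna : String) : Int :=
  if dna.toList = [] ∨ (PySem.Chars.upper dna.toList).any
      (fun c => ¬ (PySem.Chars.isIn [c] "ATGC".toList)) then 0
  else
    let counts : PySem.Dict Char Int :=
      dna.toList.foldl (fun d ch => d.insert ch (d.getD ch 0 + 1)) PySem.Dict.empty
    (([('A', (135 : Int)), ('T', 126), ('G', 151), ('C', 111)]).map
      (fun p => p.2 * counts.getD p.1 0)).sum

-- ===== PRECONDITION & SPEC =====
def Spec_get_molar_mass (dna : String) (out : Int) : Prop := out = get_molar_mass_alt dna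
instance (dna : String) (out : Int) : Decidable (Spec_get_molar_mass dna out) := by unfold Spec_get_molar_mass; infer_instance

-- ===== CLAIM (what is proved, stated in full; the proofs are below) =====
def Claim_equal_get_molar_mass : Prop := ∀ (dna : String), Dom_get_molar_mass dna → Spec_get_molar_mass dna (get_molar_mass dna)

-- ===== LEMMAS AND PROOFS =====

-- A's early-return membership loop is an all-quantifier
theorem are_chars_go_eq (string : String) (l : List Char) :
    are_chars_go string l = l.all (fun c => PySem.Chars.isIn [c] string.toList) := by
  induction l with
  | nil => rfl
  | cons c rest ih =>
      simp only [are_chars_go, List.all_cons, ih]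
      by_cases h : PySem.Chars.isIn [c] string.toList <;> simp [h]

-- the validations agree (A: is_dna; B: nonempty and no bad char in the uppercased strand)
theorem valid_iff (dna : String) :
    is_dna dna = true ↔
      ¬ (dna.toList = [] ∨ ((PySem.Chars.upper dna.toList).any
          (fun c => ¬ (PySem.Chars.isIn [c] "ATGC".toList))) = true) := by
  simp only [is_dna, are_chars, are_chars_go_eq, PySem.Str.len, PySem.Str.toList_upper]
  by_cases h : dna.toList = []
  · have h0 : dna.length = 0 := by rw [← String.length_toList, h]; rfl
    simp [h0, h]  -- empty strand: both sides invalid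
  · have hlen : ¬ dna.length = 0 := by
      rw [← String.length_toList]
      exact fun h0 => h (List.length_eq_zero_iff.mp h0)
    simp only [hlen, h, false_or, List.any_eq_true]
    push_neg
    simp
    intro _ he
    exact h (by rw [he]; rfl)

-- A's branchy accumulation is the dot product of the counts with the mass table
theorem foldl_mass (l : List Char) (m : Int) :
    l.foldl (fun masse char =>
      let masse := if char == 'A' then masse + 135 else masse
      let masse := if char == 'T' then masse + 126 else masse
      let masse := if char == 'G' then masse + 151 else masse
      if char == 'C' then masse + 111 else masse) m
    = m + 135 * (l.count 'A' : Int) + 126 * (l.count 'T' : Int)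
        + 151 * (l.count 'G' : Int) + 111 * (l.count 'C' : Int) := by
  induction l generalizing m with
  | nil => simp
  | cons c rest ih =>
      simp only [List.foldl_cons, ih, List.count_cons]
      by_cases hA : c = 'A' <;> by_cases hT : c = 'T' <;> by_cases hG : c = 'G' <;>
        by_cases hC : c = 'C' <;> simp_all <;> push_cast <;> ring

-- ===== VERDICT (by name: the statement is the Claim_ definition above) =====
theorem get_molar_mass_spec : Claim_equal_get_molar_mass := by
  intro dna _
  unfold Spec_get_molar_mass get_molar_mass get_molar_mass_alt
  by_cases h : dna.toList = [] ∨ ((PySem.Chars.upper dna.toList).any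
      (fun c => ¬ (PySem.Chars.isIn [c] "ATGC".toList))) = true
  · have hnd : ¬ (is_dna dna = true) := fun hd => (valid_iff dna).mp hd h
    rw [if_pos hnd, if_pos h]
  · have hd : is_dna dna = true := (valid_iff dna).mpr h
    rw [if_neg (by simp [hd]), if_neg h, foldl_mass]
    simp only [List.map_cons, List.map_nil, List.sum_cons, List.sum_nil,
      PySem.Dict.getD_foldl_insert_add_one, PySem.Dict.getD_empty]
    ring
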